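-- pv_equiv track=rewrite | github.com/OndraTom/JsonSchemaGenerator | src/json_schema_form.py | _get_title_from_name
-- ===== SOURCE A (Python) =====
-- def _get_title_from_name(name: str) -> str:
--     """
--     Converts given name to title:
--         name -> Name
--         snake_name -> Snake Name
--         camelName -> Camel Name
--     """
--     # remove special symbols
--     name = name.replace("#", "")
--     # snake case
--     if "_" in name:
--         return " ".join(name.split("_")).title()
--     # camel case
--     words = []
--     word = ""
--     previous_letter_is_lower = False
--     for letter in name:
--         if letter.isupper() and previous_letter_is_lower:
--             words.append(word)
--             word = letter
--         else:
--             word += letter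
--         previous_letter_is_lower = letter.islower()
--     if len(word) > 0:
--         words.append(word)
--     return " ".join(words).title()
-- ===== SOURCE B (Python) =====
-- def _get_title_from_name(name: str) -> str:
--     # remove special symbols
--     name = name.replace("#", "")
--     # snake case
--     if "_" in name:
--         return " ".join(name.split("_")).title()
--     # camel case: insert a space at each lower->upper boundary, then title-case
--     spaced = "".join(
--         " " + c if c.isupper() and p.islower() else c
--         for p, c in zip(" " + name, name)
--     )
--     return spaced.title()
-- ===== Notes on version B (the rewrite author's own statement) =====
-- stated objective: simpler
-- what changed: The camel-case branch's explicit word-accumulator state machine (words list, current word, prev-lower flag, final join) is replaced by a single pass over adjacent character pairs that inserts a space at every lowercase-to-uppercase boundary and title-cases the result.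
import Mathlib
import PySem

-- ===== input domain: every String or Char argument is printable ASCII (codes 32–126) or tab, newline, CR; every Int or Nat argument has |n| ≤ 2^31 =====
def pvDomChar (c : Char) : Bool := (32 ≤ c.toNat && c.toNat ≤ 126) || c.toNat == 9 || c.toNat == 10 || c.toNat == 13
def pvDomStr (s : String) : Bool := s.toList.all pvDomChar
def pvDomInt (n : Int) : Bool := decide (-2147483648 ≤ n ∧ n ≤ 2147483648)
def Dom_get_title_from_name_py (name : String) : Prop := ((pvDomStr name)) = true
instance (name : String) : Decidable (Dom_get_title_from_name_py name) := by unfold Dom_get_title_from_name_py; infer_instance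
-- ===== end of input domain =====

-- B replaces A's camel-case word-accumulator state machine by a single pass over
-- adjacent character pairs that inserts a space at each lower->upper boundary (simpler; same cost).

-- hand port of str.title(); exact on ASCII, where the cased characters are exactly the letters:
-- each character is uppercased after a non-letter and lowercased after a letter
def pyTitle (cs : List Char) : List Char :=
  (cs.foldl
    (fun (st : List Char × Bool) c =>
      (st.1 ++ [if st.2 then PySem.Chars.lowerChar c else PySem.Chars.upperChar c],
       PySem.Chars.isalpha c))
    ([], false)).1

-- ===== PORT A =====
def get_title_from_name_py (name : String) : String :=
  let cs := PySem.Chars.replace name.toList ['#'] []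
  if PySem.Chars.isIn ['_'] cs then
    String.ofList (pyTitle (PySem.Chars.join [' '] (PySem.Chars.splitOn cs ['_'])))
  else
    let st := cs.foldl
      (fun (st : List (List Char) × List Char × Bool) c =>
        if PySem.Chars.isupper c && st.2.2 then
          (st.1 ++ [st.2.1], [c], PySem.Chars.islower c)
        else
          (st.1, st.2.1 ++ [c], PySem.Chars.islower c))
      ([], [], false)
    let words := if st.2.1.length > 0 then st.1 ++ [st.2.1] else st.1
    String.ofList (pyTitle (PySem.Chars.join [' '] words))

-- ===== PORT B =====
def get_title_from_name_py_alt (name : String) : String :=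
  let cs := PySem.Chars.replace name.toList ['#'] []
  if PySem.Chars.isIn ['_'] cs then
    String.ofList (pyTitle (PySem.Chars.join [' '] (PySem.Chars.splitOn cs ['_'])))
  else
    let spaced := ((' ' :: cs).zip cs).flatMap
      (fun pc => if PySem.Chars.isupper pc.2 && PySem.Chars.islower pc.1 then [' ', pc.2] else [pc.2])
    String.ofList (pyTitle spaced)

-- ===== PRECONDITION & SPEC =====
def Spec_get_title_from_name_py (name : String) (out : String) : Prop := out = get_title_from_name_py_alt name
instance (name : String) (out : String) : Decidable (Spec_get_title_from_name_py name out) := by unfold Spec_get_title_from_name_py; infer_instance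

-- ===== CLAIM (what is proved, stated in full; the proofs are below) =====
def Claim_equal_get_title_from_name_py : Prop := ∀ (name : String), Dom_get_title_from_name_py name → Spec_get_title_from_name_py name (get_title_from_name_py name)

-- ===== LEMMAS AND PROOFS =====

-- recursive form of B's boundary-spacing pass, parametrised by the prev-is-lower flag
def bsp (p : Bool) : List Char → List Char
  | [] => []
  | c :: rest =>
      (if PySem.Chars.isupper c && p then [' ', c] else [c]) ++ bsp (PySem.Chars.islower c) rest

lemma bsp_eq_flatMap (x : Char) (cs : List Char) :
    ((x :: cs).zip cs).flatMap
      (fun pc => if PySem.Chars.isupper pc.2 && PySem.Chars.islower pc.1 then [' ', pc.2] else [pc.2])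
    = bsp (PySem.Chars.islower x) cs := by
  induction cs generalizing x with
  | nil => rfl
  | cons c rest ih =>
      simp only [List.zip_cons_cons, List.flatMap_cons, bsp, ih c]

lemma join_append_singleton (ws : List (List Char)) (w : List Char) :
    PySem.Chars.join [' '] (ws ++ [w]) =
      (if ws = [] then w else PySem.Chars.join [' '] ws ++ ' ' :: w) := by
  induction ws with
  | nil => simp [PySem.Chars.join, List.intercalate]
  | cons u us ih =>
      cases us with
      | nil => simp [PySem.Chars.join, List.intercalate, List.intersperse]
      | cons v vs =>
          have step : ∀ (a b : List Char) (l : List (List Char)),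
              [' '].intercalate (a :: b :: l) = a ++ [' '] ++ [' '].intercalate (b :: l) :=
            fun a b l => by simp [List.intercalate, List.intersperse]
          simp only [PySem.Chars.join, List.cons_append] at ih ⊢
          rw [step u v (vs ++ [w]), step u v vs, ih]
          simp

-- the A-loop invariant: folding from (ws, w, p) with w ≠ [] produces the already-joined
-- prefix followed by B's boundary-spacing of the remaining characters
lemma aloop_invariant (cs : List Char) (ws : List (List Char)) (w : List Char) (p : Bool)
    (hw : w ≠ []) :
    (let st := cs.foldl
      (fun (st : List (List Char) × List Char × Bool) c =>
        if PySem.Chars.isupper c && st.2.2 then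
          (st.1 ++ [st.2.1], [c], PySem.Chars.islower c)
        else
          (st.1, st.2.1 ++ [c], PySem.Chars.islower c))
      (ws, w, p)
     PySem.Chars.join [' '] (if st.2.1.length > 0 then st.1 ++ [st.2.1] else st.1))
    = (if ws = [] then w else PySem.Chars.join [' '] ws ++ ' ' :: w) ++ bsp p cs := by
  induction cs generalizing ws w p with
  | nil =>
      simp only [List.foldl_nil, bsp, List.append_nil]
      rw [if_pos (by simpa [List.length_pos_iff] using hw), join_append_singleton]
  | cons c rest ih =>
      simp only [List.foldl_cons]
      by_cases hb : (PySem.Chars.isupper c && p) = true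
      · rw [if_pos hb]
        rw [ih (ws ++ [w]) [c] _ (by simp)]
        simp only [bsp, hb, if_pos, join_append_singleton]
        split_ifs with h1 <;> simp_all
      · rw [if_neg hb]
        rw [ih ws (w ++ [c]) _ (by simp)]
        simp only [bsp, hb]
        split_ifs <;> simp_all
-- ===== VERDICT (by name: the statement is the Claim_ definition above) =====
theorem get_title_from_name_py_spec : Claim_equal_get_title_from_name_py := by
  intro name _
  unfold Spec_get_title_from_name_py get_title_from_name_py get_title_from_name_py_alt
  set cs := PySem.Chars.replace name.toList ['#'] [] with hcs
  by_cases h : PySem.Chars.isIn ['_'] cs = true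
  · simp [h]
  · simp only [h, Bool.false_eq_true, if_false]
    rcases cs with _ | ⟨c, rest⟩
    · rfl
    · rw [bsp_eq_flatMap]
      have hinv := aloop_invariant rest [] [c] (PySem.Chars.islower c) (by simp)
      -- A's first step: previous_letter_is_lower is False, so no boundary is taken
      simp only [List.foldl_cons, Bool.and_false, Bool.false_eq_true, if_false, if_true,
        List.nil_append] at hinv ⊢
      rw [hinv, show PySem.Chars.islower ' ' = false from rfl]
      simp [bsp]
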